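-- pv_equiv track=rewrite | github.com/FSoft-AI4Code/HyperAgent | evaluation_benchmark/feature_components_localization/code/extract_feature_components_from_useage.py | _remove_parent_modules
-- ===== SOURCE A (Python) =====
-- def _remove_parent_modules(imports, used_attributes):
--     final_dependencies = set(imports)
--     for attribute in used_attributes:
--         parts = attribute.split('.')
--         for i in range(1, len(parts)):
--             parent_module = '.'.join(parts[:i])
--             if parent_module in imports:
--                 final_dependencies.discard(parent_module)
--     final_dependencies.update(used_attributes)
--     return final_dependencies
-- ===== SOURCE B (Python) =====
-- def _remove_parent_modules(imports, used_attributes):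
--     result = set()
--     for imp in imports:
--         pref = imp + '.'
--         if not any(a.startswith(pref) for a in used_attributes):
--             result.add(imp)
--     result.update(used_attributes)
--     return result
-- ===== Notes on version B (the rewrite author's own statement) =====
-- stated objective: simpler
-- what changed: Instead of splitting every used attribute into dot-parts and generating/discarding every proper prefix, B keeps an import iff no used attribute starts with the import followed by a dot, testing the parent-module relation directly with one startswith per (import, attribute) pair.
import Mathlib
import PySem

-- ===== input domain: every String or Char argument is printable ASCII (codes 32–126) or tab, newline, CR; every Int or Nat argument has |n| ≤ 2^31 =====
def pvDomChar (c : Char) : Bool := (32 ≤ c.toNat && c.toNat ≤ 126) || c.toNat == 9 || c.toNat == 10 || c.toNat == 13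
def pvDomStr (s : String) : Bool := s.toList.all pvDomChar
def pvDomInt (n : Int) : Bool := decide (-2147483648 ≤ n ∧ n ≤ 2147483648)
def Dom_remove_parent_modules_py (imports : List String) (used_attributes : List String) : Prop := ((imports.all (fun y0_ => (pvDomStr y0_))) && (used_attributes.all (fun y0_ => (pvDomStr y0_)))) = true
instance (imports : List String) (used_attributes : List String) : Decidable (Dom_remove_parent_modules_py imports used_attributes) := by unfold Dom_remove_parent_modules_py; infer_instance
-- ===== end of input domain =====

-- B replaces A's generate-all-dot-prefixes-and-discard strategy by a direct per-import test
-- (keep an import iff no used attribute starts with it followed by a dot); objective: simpler.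
-- Both programs return a Python set; the ports build it in insertion order via PySem.Set.

-- ===== PORT A =====
def remove_parent_modules_py (imports : List String) (used_attributes : List String) : List String :=
  -- final_dependencies = set(imports)
  let init : PySem.Set String := PySem.Set.ofList imports
  -- for attribute in used_attributes: for i in range(1, len(parts)): ...
  let final := used_attributes.foldl (fun fd attr =>
      let parts := (PySem.Str.split? attr ".").getD []
      (PySem.List.pyRange 1 (parts.length : Int) 1).foldl (fun fd i =>
          let parent_module := PySem.Str.join "." (PySem.List.slice parts none (some i))
          if imports.contains parent_module then PySem.Set.discard fd parent_module else fd) fd)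
    init
  -- final_dependencies.update(used_attributes)
  PySem.Set.update final used_attributes

-- ===== PORT B =====
def remove_parent_modules_py_alt (imports : List String) (used_attributes : List String) : List String :=
  -- result = set(); for imp in imports: if not any(a.startswith(imp + '.') ...): result.add(imp)
  let result := imports.foldl (fun r imp =>
      let pref := imp ++ "."
      if !(used_attributes.any (fun a => PySem.Str.startswith a pref)) then
        PySem.Set.add r imp
      else r)
    (PySem.Set.empty : PySem.Set String)
  -- result.update(used_attributes)
  PySem.Set.update result used_attributes

-- ===== PRECONDITION & SPEC =====
def Spec_remove_parent_modules_py (imports : List String) (used_attributes : List String) (out : List String) : Prop := out = remove_parent_modules_py_alt imports used_attributes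
instance (imports : List String) (used_attributes : List String) (out : List String) : Decidable (Spec_remove_parent_modules_py imports used_attributes out) := by unfold Spec_remove_parent_modules_py; infer_instance

-- ===== CLAIM (what is proved, stated in full; the proofs are below) =====
def Claim_equal_remove_parent_modules_py : Prop := ∀ (imports : List String) (used_attributes : List String), Dom_remove_parent_modules_py imports used_attributes → Spec_remove_parent_modules_py imports used_attributes (remove_parent_modules_py imports used_attributes)

-- ===== LEMMAS AND PROOFS =====
theorem pv_go_eq (c : Char) (fuel : Nat) (l cur : List Char) (acc : List (List Char)) (h : l.length < fuel) :
    PySem.Chars.splitOn.go [c] fuel l cur acc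
      = acc.reverse ++ List.modifyHead (cur.reverse ++ ·) (l.splitOnP (· == c)) := by
  induction fuel generalizing l cur acc with
  | zero => omega
  | succ f ih =>
    cases l with
    | nil => simp [PySem.Chars.splitOn.go]
    | cons ch rest =>
      rw [PySem.Chars.splitOn.go]
      by_cases hc : c = ch
      · subst hc
        have hpre : [c].isPrefixOf (c :: rest) = true := by simp [List.isPrefixOf]
        rw [if_pos hpre]
        rw [ih _ _ _ (by simpa using Nat.lt_of_succ_lt_succ h)]
        rw [List.splitOnP_cons, if_pos (by simp)]
        cases hs : List.splitOnP (fun x => x == c) rest <;> simp [hs]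
      · have hpre : [c].isPrefixOf (ch :: rest) = false := by
          simp [List.isPrefixOf]; exact fun h' => hc h'
        rw [if_neg (by simp [hpre])]
        rw [ih _ _ _ (by simpa using Nat.lt_of_succ_lt_succ h)]
        rw [List.splitOnP_cons]
        have hb : (ch == c) = false := by simp; exact fun h' => hc h'.symm
        rw [if_neg (by simp [hb]), List.modifyHead_modifyHead]
        have hf : (fun x => (ch :: cur).reverse ++ x) = ((fun x => cur.reverse ++ x) ∘ List.cons ch) := by
          funext x; simp
        rw [hf]

theorem pv_splitOn_eq (c : Char) (l : List Char) :
    PySem.Chars.splitOn l [c] = l.splitOnP (· == c) := by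
  rw [PySem.Chars.splitOn, pv_go_eq c _ l [] [] (by omega)]
  cases hs : List.splitOnP (fun x => x == c) l <;> simp_all

theorem pv_intercalate_cons (sep a : List Char) (l : List (List Char)) (h : l ≠ []) :
    sep.intercalate (a :: l) = a ++ sep ++ sep.intercalate l := by
  cases l with
  | nil => exact absurd rfl h
  | cons b l' => simp [List.intercalate, List.intersperse]

theorem pv_intercalate_append (sep : List Char) (l1 l2 : List (List Char))
    (h1 : l1 ≠ []) (h2 : l2 ≠ []) :
    sep.intercalate (l1 ++ l2) = sep.intercalate l1 ++ sep ++ sep.intercalate l2 := by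
  induction l1 with
  | nil => exact absurd rfl h1
  | cons a l1' ih =>
    cases l1' with
    | nil =>
      rw [List.singleton_append, pv_intercalate_cons sep a l2 h2]
      simp [List.intercalate]
    | cons b t =>
      rw [List.cons_append, pv_intercalate_cons sep a ((b::t) ++ l2) (by simp),
          pv_intercalate_cons sep a (b::t) (by simp), ih (by simp)]
      simp

theorem pv_prefix_iff (a x : List Char) :
    (∃ i : Nat, 1 ≤ i ∧ i < (a.splitOnP (· == '.')).length ∧
      List.intercalate ['.'] ((a.splitOnP (· == '.')).take i) = x)
    ↔ (x ++ ['.']) <+: a := by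
  constructor
  · rintro ⟨i, h1, hlt, heq⟩
    have ha : List.intercalate ['.'] (a.splitOnP (· == '.')) = a :=
      List.intercalate_splitOn (xs := a) '.'
    have hsplit : a.splitOnP (· == '.')
        = (a.splitOnP (· == '.')).take i ++ (a.splitOnP (· == '.')).drop i :=
      (List.take_append_drop _ _).symm
    have htk : (a.splitOnP (· == '.')).take i ≠ [] := by
      have : ((a.splitOnP (· == '.')).take i).length = i := by
        rw [List.length_take]; omega
      intro hnil; rw [hnil] at this; simp at this; omega
    have hdr : (a.splitOnP (· == '.')).drop i ≠ [] := by
      have : ((a.splitOnP (· == '.')).drop i).length = (a.splitOnP (· == '.')).length - i := by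
        simp
      intro hnil; rw [hnil] at this; simp at this; omega
    rw [hsplit, pv_intercalate_append _ _ _ htk hdr, heq] at ha
    conv_rhs => rw [← ha]
    exact List.prefix_append _ _
  · rintro ⟨r, hr⟩
    have hr' : a = x ++ '.' :: r := by rw [← hr]; simp
    refine ⟨(x.splitOnP (· == '.')).length, ?_, ?_, ?_⟩
    · have := List.splitOnP_ne_nil (· == '.') x
      cases hx : x.splitOnP (· == '.') with
      | nil => exact absurd hx this
      | cons _ _ => simp
    · rw [hr', List.splitOnP_append_cons _ _ _ _ (by simp)]
      have h3 := List.splitOnP_ne_nil (· == '.') r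
      cases hx : r.splitOnP (· == '.') with
      | nil => exact absurd hx h3
      | cons _ _ => simp
    · rw [hr', List.splitOnP_append_cons _ _ _ _ (by simp), List.take_left]
      exact List.intercalate_splitOn (xs := x) '.'

theorem pv_parts_eq (a : String) :
    (PySem.Str.split? a ".").getD []
      = (a.toList.splitOnP (· == '.')).map String.ofList := by
  rw [PySem.Str.split?]
  have : (".".toList : List Char) = ['.'] := by decide
  rw [this, PySem.Chars.split?]
  simp [pv_splitOn_eq]

theorem pv_any_eq (a x : String) :
    ((PySem.List.pyRange 1 ((((PySem.Str.split? a ".").getD []).length : Int)) 1).any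
        (fun i => PySem.Str.join "." (PySem.List.slice ((PySem.Str.split? a ".").getD []) none (some i)) == x))
      = PySem.Str.startswith a (x ++ ".") := by
  rw [Bool.eq_iff_iff]
  rw [PySem.Str.startswith_eq, PySem.Chars.startswith_iff]
  have hx : ((x ++ ".").toList : List Char) = x.toList ++ ['.'] := by
    rw [String.toList_append]; congr 1
  rw [hx, ← pv_prefix_iff a.toList x.toList]
  rw [List.any_eq_true]
  constructor
  · rintro ⟨i, hmem, heq⟩
    rw [PySem.List.mem_pyRange_one] at hmem
    obtain ⟨h1, h2⟩ := hmem
    refine ⟨i.toNat, by omega, ?_, ?_⟩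
    · rw [pv_parts_eq] at h2; simp at h2; omega
    · rw [PySem.List.slice_to ((PySem.Str.split? a ".").getD []) (b := i) (by omega), pv_parts_eq] at heq
      rw [← List.map_take] at heq
      rw [PySem.Str.join] at heq
      simp only [List.map_map] at heq
      have hcomp : (String.toList ∘ String.ofList) = id := by
        funext l; simp
      rw [hcomp, List.map_id] at heq
      rw [beq_iff_eq] at heq
      have : PySem.Chars.join ".".toList ((a.toList.splitOnP (· == '.')).take i.toNat) = x.toList := by
        rw [← heq]; simp
      rw [PySem.Chars.join] at this
      have hdot : (".".toList : List Char) = ['.'] := by decide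
      rw [hdot] at this
      exact this
  · rintro ⟨j, h1, h2, heq⟩
    refine ⟨(j : Int), ?_, ?_⟩
    · rw [PySem.List.mem_pyRange_one, pv_parts_eq]
      simp; omega
    · rw [PySem.List.slice_to ((PySem.Str.split? a ".").getD []) (b := (j:Int)) (by omega), pv_parts_eq]
      rw [← List.map_take, PySem.Str.join]
      simp only [List.map_map]
      have hcomp : (String.toList ∘ String.ofList) = id := by
        funext l; simp
      rw [hcomp, List.map_id, beq_iff_eq, PySem.Chars.join]
      have hdot : (".".toList : List Char) = ['.'] := by decide
      rw [hdot]
      simp only [Int.toNat_natCast]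
      rw [heq]
      simp

theorem pv_foldl_discard (vs : List Int) (g : Int → String) (q : String → Bool) (s : List String) :
    vs.foldl (fun s i => if q (g i) then PySem.Set.discard s (g i) else s) s
      = s.filter (fun x => !(q x && vs.any (fun i => g i == x))) := by
  induction vs generalizing s with
  | nil => simp
  | cons i vs' ih =>
    rw [List.foldl_cons, ih]
    by_cases hq : q (g i)
    · rw [if_pos hq, PySem.Set.discard, List.filter_filter]
      apply List.filter_congr
      intro x _
      by_cases hgx : g i = x
      · subst hgx; simp [hq]
      · have h1 : (g i == x) = false := by simp [hgx]
        have h2 : (x == g i) = false := by simp; exact fun h => hgx h.symm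
        simp [h1, h2]
    · rw [if_neg hq]
      apply List.filter_congr
      intro x _
      by_cases hgx : g i = x
      · subst hgx; simp [hq]
      · have h1 : (g i == x) = false := by simp [hgx]
        simp [h1]

theorem pv_foldl_filter (us : List String) (f : String → String → Bool) (s : List String) :
    us.foldl (fun s a => s.filter (fun x => f a x)) s
      = s.filter (fun x => us.all (fun a => f a x)) := by
  induction us generalizing s with
  | nil => simp
  | cons a us' ih =>
    rw [List.foldl_cons, ih, List.filter_filter]
    apply List.filter_congr
    intro x _
    simp [Bool.and_comm]

theorem pv_filter_add (p : String → Bool) (s : List String) (x : String) :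
    (PySem.Set.add s x).filter p
      = if p x then PySem.Set.add (s.filter p) x else s.filter p := by
  rw [PySem.Set.add, PySem.Set.add]
  by_cases hc : PySem.Set.contains s x
  · rw [if_pos hc]
    have hx : x ∈ s := by
      have := hc; rw [PySem.Set.contains] at this; simpa using this
    by_cases hp : p x
    · rw [if_pos hp, if_pos (by rw [PySem.Set.contains]; simp [List.mem_filter, hx, hp])]
    · rw [if_neg hp]
  · rw [if_neg hc]
    have hx : x ∉ s := by
      intro h; apply hc; rw [PySem.Set.contains]; simpa using h
    rw [List.filter_append]
    by_cases hp : p x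
    · rw [if_pos hp, if_neg (by rw [PySem.Set.contains]; simp [List.mem_filter, hx])]
      simp [hp]
    · rw [if_neg hp]; simp [hp]

theorem pv_foldl_if_add (p : String → Bool) (xs : List String) (s : List String) :
    xs.foldl (fun r x => if p x then PySem.Set.add r x else r) (s.filter p)
      = (xs.foldl PySem.Set.add s).filter p := by
  induction xs generalizing s with
  | nil => simp
  | cons x xs' ih =>
    rw [List.foldl_cons, List.foldl_cons, ← ih, ← pv_filter_add]

theorem pv_cores_eq (imports used_attributes : List String) :
    used_attributes.foldl (fun fd attr =>
      (PySem.List.pyRange 1 ((((PySem.Str.split? attr ".").getD []).length : Int)) 1).foldl (fun fd i =>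
          if imports.contains (PySem.Str.join "." (PySem.List.slice ((PySem.Str.split? attr ".").getD []) none (some i)))
          then PySem.Set.discard fd (PySem.Str.join "." (PySem.List.slice ((PySem.Str.split? attr ".").getD []) none (some i)))
          else fd) fd)
      (PySem.Set.ofList imports)
    = imports.foldl (fun r imp =>
        if !(used_attributes.any (fun a => PySem.Str.startswith a (imp ++ "."))) then
          PySem.Set.add r imp
        else r) (PySem.Set.empty : PySem.Set String) := by
  have hstep : (fun (fd : List String) (attr : String) =>
      (PySem.List.pyRange 1 ((((PySem.Str.split? attr ".").getD []).length : Int)) 1).foldl (fun fd i =>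
          if imports.contains (PySem.Str.join "." (PySem.List.slice ((PySem.Str.split? attr ".").getD []) none (some i)))
          then PySem.Set.discard fd (PySem.Str.join "." (PySem.List.slice ((PySem.Str.split? attr ".").getD []) none (some i)))
          else fd) fd)
      = fun fd attr => fd.filter (fun x => !(imports.contains x && PySem.Str.startswith attr (x ++ "."))) := by
    funext fd attr
    rw [pv_foldl_discard _ (fun i => PySem.Str.join "." (PySem.List.slice ((PySem.Str.split? attr ".").getD []) none (some i))) (fun p => imports.contains p) fd]
    apply List.filter_congr
    intro x _
    rw [pv_any_eq]
  rw [hstep, pv_foldl_filter]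
  have hempty : (PySem.Set.empty : PySem.Set String)
      = ([] : List String).filter (fun imp => !(used_attributes.any (fun a => PySem.Str.startswith a (imp ++ ".")))) := rfl
  rw [hempty, pv_foldl_if_add]
  rw [show (List.foldl PySem.Set.add ([] : List String) imports) = PySem.Set.ofList imports from rfl]
  apply List.filter_congr
  intro x hx
  have hxmem : x ∈ imports := (PySem.Set.mem_ofList imports x).mp hx
  have hc : imports.contains x = true := by simpa using hxmem
  rw [Bool.eq_iff_iff]
  simp [List.all_eq_true]
  exact ⟨fun h a ha => (h a ha).resolve_left (fun h' => h' hxmem), fun h a ha => Or.inr (h a ha)⟩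

theorem remove_parent_modules_py_spec : Claim_equal_remove_parent_modules_py := by
  intro imports used_attributes _
  unfold Spec_remove_parent_modules_py
  simp only [remove_parent_modules_py, remove_parent_modules_py_alt]
  exact congrArg (fun s => PySem.Set.update s used_attributes) (pv_cores_eq imports used_attributes)
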